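-- pv_equiv track=rewrite | github.com/daisuke-1022/Scraping | pokemoncenter_staffvoice.py | get_updated_items
-- ===== SOURCE A (Python) =====
-- def get_updated_items(current_data, last_data, comparison_keys):
--     updated_items = []
--     for new_item in current_data:
--         is_new = True
--         for old_item in last_data:
--             if all(new_item.get(key) == old_item.get(key) for key in comparison_keys):
--                 is_new = False
--                 if new_item != old_item:
--                     updated_items.append(new_item)
--                 break
--         if is_new:
--             updated_items.append(new_item)
--     return updated_items
-- ===== SOURCE B (Python) =====
-- def get_updated_items(current_data, last_data, comparison_keys):
--     # Index last_data by comparison-key tuple (first occurrence wins), then one O(k) lookup per new item.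
--     index = {}
--     for old_item in last_data:
--         index.setdefault(tuple(old_item.get(k) for k in comparison_keys), old_item)
--     return [new_item for new_item in current_data
--             if (old := index.get(tuple(new_item.get(k) for k in comparison_keys))) is None
--             or new_item != old]
-- ===== Notes on version B (the rewrite author's own statement) =====
-- stated objective: faster
-- what changed: Replaces A's inner linear scan of last_data per new item by a dict indexing last_data by its comparison-key tuple (first occurrence wins), built once, so each new item is matched by one O(k) hash lookup.
import Mathlib
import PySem

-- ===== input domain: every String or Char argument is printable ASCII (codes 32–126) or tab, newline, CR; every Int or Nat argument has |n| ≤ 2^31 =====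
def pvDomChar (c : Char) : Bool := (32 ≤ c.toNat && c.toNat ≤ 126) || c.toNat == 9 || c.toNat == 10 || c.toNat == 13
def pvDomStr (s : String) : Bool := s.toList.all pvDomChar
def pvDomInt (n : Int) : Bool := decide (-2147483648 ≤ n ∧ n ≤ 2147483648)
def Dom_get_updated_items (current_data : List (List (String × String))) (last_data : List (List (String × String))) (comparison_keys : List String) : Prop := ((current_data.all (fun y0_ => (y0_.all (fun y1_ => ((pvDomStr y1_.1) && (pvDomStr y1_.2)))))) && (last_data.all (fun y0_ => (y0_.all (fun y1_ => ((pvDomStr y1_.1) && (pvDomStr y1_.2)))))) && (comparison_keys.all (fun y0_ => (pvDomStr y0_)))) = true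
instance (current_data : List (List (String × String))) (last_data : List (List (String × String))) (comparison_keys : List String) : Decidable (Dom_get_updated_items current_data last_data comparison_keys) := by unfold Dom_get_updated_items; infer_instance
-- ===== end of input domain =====

-- B replaces A's inner scan of last_data by a dict indexed by comparison-key tuple, built once
-- (first occurrence wins): O((n+m)·k) instead of O(n·m·k). Exact same return value.
-- Items are Python dicts: each List (String × String) argument is normalised with Dict.ofList
-- (dict() semantics: duplicate keys collapse, last value wins), and an appended item is rendered
-- back as its items list. Python's '==' on dicts ignores insertion order, hence pyDictEq.

-- ===== PORT A =====
-- Python dict equality: same size and every (k,v) of a is mapped by b (keys of a Dict are unique).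
def pyDictEq (a b : PySem.Dict String String) : Bool :=
  a.size == b.size && a.items.all (fun kv => b.get? kv.1 == some kv.2)

-- the inner 'for old_item in last_data: … break' loop of A
def pvFindMatch (new : PySem.Dict String String) (last : List (PySem.Dict String String))
    (keys : List String) : Option (PySem.Dict String String) :=
  match last with
  | [] => none
  | old :: rest =>
      if keys.all (fun k => new.get? k == old.get? k) then some old
      else pvFindMatch new rest keys

def get_updated_items (current_data : List (List (String × String))) (last_data : List (List (String × String))) (comparison_keys : List String) : List (List (String × String)) :=
  let lastD := last_data.map PySem.Dict.ofList
  current_data.foldl (fun updated_items x =>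
    let new_item := PySem.Dict.ofList x
    match pvFindMatch new_item lastD comparison_keys with
    | none => updated_items ++ [new_item.items]          -- is_new stayed True
    | some old_item =>
        if pyDictEq new_item old_item then updated_items
        else updated_items ++ [new_item.items]) []

-- ===== PORT B =====
-- tuple(old_item.get(k) for k in comparison_keys)
def pvTup (keys : List String) (d : PySem.Dict String String) : List (Option String) :=
  keys.map (fun k => d.get? k)

def get_updated_items_alt (current_data : List (List (String × String))) (last_data : List (List (String × String))) (comparison_keys : List String) : List (List (String × String)) :=
  let index := (last_data.map PySem.Dict.ofList).foldl
    (fun idx old_item => idx.setdefault (pvTup comparison_keys old_item) old_item)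
    PySem.Dict.empty
  ((current_data.map PySem.Dict.ofList).filter (fun new_item =>
    match index.get? (pvTup comparison_keys new_item) with
    | none => true
    | some old_item => !pyDictEq new_item old_item)).map PySem.Dict.items

-- ===== PRECONDITION & SPEC =====
def Spec_get_updated_items (current_data : List (List (String × String))) (last_data : List (List (String × String))) (comparison_keys : List String) (out : List (List (String × String))) : Prop := out = get_updated_items_alt current_data last_data comparison_keys
instance (current_data : List (List (String × String))) (last_data : List (List (String × String))) (comparison_keys : List String) (out : List (List (String × String))) : Decidable (Spec_get_updated_items current_data last_data comparison_keys out) := by unfold Spec_get_updated_items; infer_instance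

-- ===== CLAIM (what is proved, stated in full; the proofs are below) =====
def Claim_equal_get_updated_items : Prop := ∀ (current_data : List (List (String × String))) (last_data : List (List (String × String))) (comparison_keys : List String), Dom_get_updated_items current_data last_data comparison_keys → Spec_get_updated_items current_data last_data comparison_keys (get_updated_items current_data last_data comparison_keys)

-- ===== LEMMAS AND PROOFS =====

-- A's per-key conjunction is equality of the two key tuples
lemma all_eq_tup (keys : List String) (a b : PySem.Dict String String) :
    (keys.all (fun k => a.get? k == b.get? k)) = (pvTup keys b == pvTup keys a) := by
  induction keys with
  | nil => simp [pvTup]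
  | cons k rest ih => simp [pvTup, List.all_cons, ih, BEq.comm]

-- A's inner loop is first-match search on the key tuple
lemma findMatch_eq (new : PySem.Dict String String) (l : List (PySem.Dict String String))
    (keys : List String) :
    pvFindMatch new l keys = l.find? (fun old => pvTup keys old == pvTup keys new) := by
  induction l with
  | nil => rfl
  | cons o rest ih =>
      simp only [pvFindMatch, all_eq_tup, List.find?_cons, ih]
      by_cases h : (pvTup keys o == pvTup keys new) = true <;> simp [h]

-- B's index lookup is first-match search on the key tuple
lemma idx_get (keys : List String) (l : List (PySem.Dict String String))
    (idx : PySem.Dict (List (Option String)) (PySem.Dict String String)) (t : List (Option String)) :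
    (l.foldl (fun idx old => idx.setdefault (pvTup keys old) old) idx).get? t
      = (idx.get? t).or (l.find? (fun old => pvTup keys old == t)) := by
  induction l generalizing idx with
  | nil => simp
  | cons o rest ih =>
      simp only [List.foldl_cons, ih, List.find?_cons]
      by_cases h : t = pvTup keys o
      · subst h
        rw [PySem.Dict.get?_setdefault_self]
        cases hi : idx.get? (pvTup keys o) <;> simp
      · rw [PySem.Dict.get?_setdefault_of_ne _ _ h]
        have : (pvTup keys o == t) = false := by
          simp [beq_eq_false_iff_ne]; exact fun hh => h hh.symm
        simp [this]

-- ===== VERDICT (by name: the statement is the Claim_ definition above) =====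
-- the common shape after both ports are rewritten to branch on the same first-match search
lemma main_aux (keys : List String) (lastD : List (PySem.Dict String String))
    (cur : List (List (String × String))) (acc : List (List (String × String))) :
    cur.foldl (fun acc x =>
        match lastD.find? (fun old => pvTup keys old == pvTup keys (PySem.Dict.ofList x)) with
        | none => acc ++ [(PySem.Dict.ofList x).items]
        | some old => if pyDictEq (PySem.Dict.ofList x) old then acc
                      else acc ++ [(PySem.Dict.ofList x).items]) acc
      = acc ++ ((cur.map PySem.Dict.ofList).filter (fun new =>
          match lastD.find? (fun old => pvTup keys old == pvTup keys new) with
          | none => true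
          | some old => !pyDictEq new old)).map PySem.Dict.items := by
  induction cur generalizing acc with
  | nil => simp
  | cons x rest ih =>
      simp only [List.foldl_cons, List.map_cons, List.filter_cons]
      cases h : lastD.find? (fun old => pvTup keys old == pvTup keys (PySem.Dict.ofList x)) with
      | none => simp [ih]
      | some old =>
          by_cases he : pyDictEq (PySem.Dict.ofList x) old = true <;> simp [he, ih]

theorem get_updated_items_spec : Claim_equal_get_updated_items := by
  intro cur last keys _
  show get_updated_items cur last keys = get_updated_items_alt cur last keys
  unfold get_updated_items get_updated_items_alt
  simp only [findMatch_eq, idx_get, PySem.Dict.get?_empty, Option.none_or]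
  exact main_aux keys (last.map PySem.Dict.ofList) cur []
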